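-- pv_equiv track=rewrite | github.com/kody-w/RAR | api/v1/agent/aibast-agents-library__deal_progression.py | _blocker_summary
-- ===== SOURCE A (Python) =====
-- def _blocker_summary(stalled):
--     """Group stalled deals by blocker type and count."""
--     counts = {}
--     for d in stalled:
--         b = d["blocker"]
--         label = {
--             "executive_change": "Missing executive sponsor",
--             "legal_review": "Legal / contract review",
--             "competitor_eval": "Competitor evaluation ongoing",
--             "budget_hold": "Budget approval pending",
--             "no_champion": "No internal champion",
--         }.get(b, b)
--         counts[label] = counts.get(label, 0) + 1
--     return counts
-- ===== SOURCE B (Python) =====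
-- _LABELS = {
--     "executive_change": "Missing executive sponsor",
--     "legal_review": "Legal / contract review",
--     "competitor_eval": "Competitor evaluation ongoing",
--     "budget_hold": "Budget approval pending",
--     "no_champion": "No internal champion",
-- }
--
--
-- def _blocker_summary(stalled):
--     """Group stalled deals by blocker type and count."""
--     counts_raw = {}
--     for d in stalled:
--         b = d["blocker"]
--         counts_raw[b] = counts_raw.get(b, 0) + 1
--     result = {}
--     for b, n in counts_raw.items():
--         label = _LABELS.get(b, b)
--         result[label] = result.get(label, 0) + n
--     return result
-- ===== Notes on version B (the rewrite author's own statement) =====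
-- stated objective: alternative
-- what changed: B counts deals by raw blocker key in one pass into an intermediate table, then a second pass over the distinct raw keys translates each through the label mapping (hoisted to a module constant instead of being rebuilt per deal) and merges the counts, instead of relabeling inline during a single scan.
import Mathlib
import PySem

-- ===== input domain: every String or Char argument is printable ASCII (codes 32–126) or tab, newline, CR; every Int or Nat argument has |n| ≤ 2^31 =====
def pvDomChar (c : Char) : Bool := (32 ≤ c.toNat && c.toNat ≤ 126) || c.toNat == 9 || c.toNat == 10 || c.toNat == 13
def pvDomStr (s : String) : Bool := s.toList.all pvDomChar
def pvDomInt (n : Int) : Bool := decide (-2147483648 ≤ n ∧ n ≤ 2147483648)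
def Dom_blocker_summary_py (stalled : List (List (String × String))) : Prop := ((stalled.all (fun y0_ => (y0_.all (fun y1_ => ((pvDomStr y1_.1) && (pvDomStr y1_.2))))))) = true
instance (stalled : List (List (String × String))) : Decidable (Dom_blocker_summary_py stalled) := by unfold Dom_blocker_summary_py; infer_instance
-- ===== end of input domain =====

-- ===== PORT A =====
-- B hoists the per-deal label-dict rebuild into a constant and splits the scan into
-- raw-key counting followed by a relabel-and-merge pass over distinct keys (return value only; no mutation).
-- Port of A: one pass; each deal's "blocker" is looked up (KeyError → none, excluded by Pre_),
-- translated through the (per-iteration) label dict literal, and counted inline.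
def blocker_summary_py (stalled : List (List (String × String))) : List (String × Int) :=
  (stalled.foldl (fun counts d =>
    match (PySem.Dict.mk d).get? "blocker" with
    | none => counts  -- Python raises KeyError here; unreachable under Pre_
    | some b =>
      let label := (PySem.Dict.ofList [("executive_change", "Missing executive sponsor"),
        ("legal_review", "Legal / contract review"),
        ("competitor_eval", "Competitor evaluation ongoing"),
        ("budget_hold", "Budget approval pending"),
        ("no_champion", "No internal champion")]).getD b b
      counts.insert label (counts.getD label 0 + 1)) PySem.Dict.empty).items

-- ===== PORT B =====
-- module constant _LABELS
def blockerLabels : PySem.Dict String String :=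
  PySem.Dict.ofList [("executive_change", "Missing executive sponsor"),
    ("legal_review", "Legal / contract review"),
    ("competitor_eval", "Competitor evaluation ongoing"),
    ("budget_hold", "Budget approval pending"),
    ("no_champion", "No internal champion")]

def blocker_summary_py_alt (stalled : List (List (String × String))) : List (String × Int) :=
  let counts_raw : PySem.Dict String Int := stalled.foldl (fun counts_raw d =>
    match (PySem.Dict.mk d).get? "blocker" with
    | none => counts_raw  -- Python raises KeyError here; unreachable under Pre_
    | some b => counts_raw.insert b (counts_raw.getD b 0 + 1)) PySem.Dict.empty
  (counts_raw.items.foldl (fun result p =>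
    let label := blockerLabels.getD p.1 p.1
    result.insert label (result.getD label 0 + p.2)) PySem.Dict.empty).items

-- ===== PRECONDITION & SPEC =====
-- Pre_ excludes exactly the deals without a "blocker" key, on which Python A raises KeyError.
def Pre_blocker_summary_py (stalled : List (List (String × String))) : Prop :=
  (stalled.all (fun d => (PySem.Dict.mk d).contains "blocker")) = true
instance (stalled : List (List (String × String))) : Decidable (Pre_blocker_summary_py stalled) := by
  unfold Pre_blocker_summary_py; infer_instance

def pvWitness_blocker_summary_py : (List (List (String × String))) :=
  [[("blocker", "legal_review"), ("name", "acme")], [("blocker", "odd one")]]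

def Spec_blocker_summary_py (stalled : List (List (String × String))) (out : List (String × Int)) : Prop := out = blocker_summary_py_alt stalled
instance (stalled : List (List (String × String))) (out : List (String × Int)) : Decidable (Spec_blocker_summary_py stalled out) := by unfold Spec_blocker_summary_py; infer_instance

-- ===== CLAIM (what is proved, stated in full; the proofs are below) =====
def Claim_equal_blocker_summary_py : Prop := ∀ (stalled : List (List (String × String))), Dom_blocker_summary_py stalled → Pre_blocker_summary_py stalled → Spec_blocker_summary_py stalled (blocker_summary_py stalled)

-- ===== LEMMAS AND PROOFS =====

-- the raw blocker key of a deal (meaningful under Pre_)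
def rawKey (d : List (String × String)) : String :=
  ((PySem.Dict.mk d).get? "blocker").getD ""

-- the label function both programs apply
def labelOf (b : String) : String := blockerLabels.getD b b

-- a fold that pattern-matches the (always-some, under Pre_) lookup is a fold over the raw keys
theorem foldl_match_eq {α : Type} (g : α → String → α) :
    ∀ (l : List (List (String × String))) (d0 : α),
      (∀ d ∈ l, ((PySem.Dict.mk d).get? "blocker").isSome) →
      l.foldl (fun c d =>
        match (PySem.Dict.mk d).get? "blocker" with
        | none => c
        | some b => g c b) d0 = (l.map rawKey).foldl g d0 := by
  intro l
  induction l with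
  | nil => intro d0 _; rfl
  | cons d t ih =>
    intro d0 h
    have hd := h d (by simp)
    simp only [List.foldl_cons, List.map_cons]
    rcases ho : (PySem.Dict.mk d).get? "blocker" with _ | b
    · rw [ho] at hd; simp at hd
    · have : rawKey d = b := by simp [rawKey, ho]
      rw [this]
      exact ih _ (fun x hx => h x (by simp [hx]))

theorem sum_map_intCast (l : List String) (g : String → Nat) :
    (l.map (fun k => ((g k : Nat) : Int))).sum = (((l.map g).sum : Nat) : Int) := by
  induction l with
  | nil => rfl
  | cons x t ih => simp [ih]

theorem set_add_of_mem {s : PySem.Set String} {y : String} (h : y ∈ s) :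
    s.add y = s := by
  simp [PySem.Set.add, h]

theorem set_add_of_not_mem {s : PySem.Set String} {y : String} (h : y ∉ s) :
    s.add y = s ++ [y] := by
  simp [PySem.Set.add, h]

theorem set_ofList_append_singleton (l : List String) (y : String) :
    PySem.Set.ofList (l ++ [y]) = (PySem.Set.ofList l).add y := by
  simp [PySem.Set.ofList, List.foldl_append]

theorem ofList_map_ofList (f : String → String) :
    ∀ (xs : List String),
      PySem.Set.ofList ((PySem.Set.ofList xs).map f) = PySem.Set.ofList (xs.map f) := by
  intro xs
  induction xs using List.reverseRecOn with
  | nil => rfl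
  | append_singleton t x ih =>
    rw [set_ofList_append_singleton, List.map_append, List.map_singleton,
      set_ofList_append_singleton]
    by_cases hx : x ∈ t
    · rw [set_add_of_mem ((PySem.Set.mem_ofList t x).mpr hx), ih,
        set_add_of_mem ((PySem.Set.mem_ofList (t.map f) (f x)).mpr (List.mem_map_of_mem hx))]
    · rw [set_add_of_not_mem (fun h => hx ((PySem.Set.mem_ofList t x).mp h)),
        List.map_append, List.map_singleton, set_ofList_append_singleton, ih]

-- getD after B's merge loop: the default plus the total weight carried to that key
theorem getD_merge_fold (f : String → String) :
    ∀ (l : List (String × Int)) (d : PySem.Dict String Int) (v : String),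
      (l.foldl (fun c p => c.insert (f p.1) (c.getD (f p.1) 0 + p.2)) d).getD v 0
        = d.getD v 0 + ((l.filter (fun p => f p.1 == v)).map (·.2)).sum := by
  intro l
  induction l with
  | nil => simp
  | cons p t ih =>
    intro d v
    simp only [List.foldl_cons]
    rw [ih]
    by_cases hv : f p.1 = v
    · simp [hv]
      ring
    · rw [PySem.Dict.getD_insert]
      simp [hv, Ne.symm hv]

-- keys of B's merge loop: the distinct labels in first-occurrence order
theorem keys_merge_counter (f : String → String) (bs : List String) :
    ((PySem.Dict.counter bs).items.foldl
        (fun c p => c.insert (f p.1) (c.getD (f p.1) 0 + p.2)) PySem.Dict.empty).keys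
      = PySem.Set.ofList (bs.map f) := by
  have h : ((PySem.Dict.counter bs).items.foldl
        (fun c p => c.insert (f p.1) (c.getD (f p.1) 0 + p.2)) PySem.Dict.empty).keys
      = PySem.Set.update (PySem.Dict.empty : PySem.Dict String Int).keys
          ((PySem.Dict.counter bs).items.map (fun (p : String × Int) => f p.1)) :=
    PySem.Dict.keys_foldl_insert_key _ (fun (p : String × Int) => f p.1)
      (fun (c : PySem.Dict String Int) (p : String × Int) => c.getD (f p.1) 0 + p.2) _
  rw [h]
  have h1 : (PySem.Dict.counter bs).items.map (fun p => f p.1)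
      = (PySem.Set.ofList bs).map f := by
    rw [PySem.Dict.items_counter, List.map_map]; rfl
  rw [h1, show PySem.Set.update (PySem.Dict.empty : PySem.Dict String Int).keys ((PySem.Set.ofList bs).map f)
      = PySem.Set.ofList ((PySem.Set.ofList bs).map f) from rfl,
    ofList_map_ofList]

theorem perm_ofList_dedup (bs : List String) :
    (PySem.Set.ofList bs).Perm bs.dedup := by
  refine (List.perm_ext_iff_of_nodup (PySem.Set.nodup_ofList bs) bs.nodup_dedup).mpr ?_
  intro a
  rw [PySem.Set.mem_ofList, List.mem_dedup]

-- B's second pass over the counter of the raw keys rebuilds the counter of the labels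
theorem merge_counter_eq (f : String → String) (bs : List String) :
    (PySem.Dict.counter bs).items.foldl
        (fun c p => c.insert (f p.1) (c.getD (f p.1) 0 + p.2)) PySem.Dict.empty
      = PySem.Dict.counter (bs.map f) := by
  have hnd : ((PySem.Dict.counter bs).items.foldl
      (fun c p => c.insert (f p.1) (c.getD (f p.1) 0 + p.2)) PySem.Dict.empty).keys.Nodup :=
    PySem.Dict.nodup_keys_foldl_insert_key _ (fun (p : String × Int) => f p.1)
      (fun (c : PySem.Dict String Int) (p : String × Int) => c.getD (f p.1) 0 + p.2)
      PySem.Dict.empty List.nodup_nil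
  have hgetD : ∀ v, ((PySem.Dict.counter bs).items.foldl
      (fun c p => c.insert (f p.1) (c.getD (f p.1) 0 + p.2)) PySem.Dict.empty).getD v 0
      = ((bs.map f).count v : Int) := by
    intro v
    rw [getD_merge_fold, show (PySem.Dict.empty : PySem.Dict String Int).getD v 0 = 0 from rfl,
      zero_add, PySem.Dict.items_counter, List.filter_map, List.map_map]
    simp only [Function.comp_def]
    rw [sum_map_intCast _ (fun k => bs.count k)]
    have hperm : (((PySem.Set.ofList bs).filter (fun k => f k == v)).map (fun k => bs.count k)).Perm
        ((bs.dedup.filter (fun k => f k == v)).map (fun k => bs.count k)) :=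
      ((perm_ofList_dedup bs).filter _).map _
    rw [hperm.sum_eq, List.sum_map_count_dedup_filter_eq_countP (fun k => f k == v) bs,
      List.count_eq_countP, List.countP_map]
    rfl
  apply PySem.Dict.ext
  rw [PySem.Dict.items_eq_map_keys _ hnd (0 : Int), keys_merge_counter]
  conv_rhs => rw [PySem.Dict.items_counter]
  refine List.map_congr_left (fun k _ => ?_)
  rw [hgetD k]

theorem ports_agree (stalled : List (List (String × String)))
    (h : Pre_blocker_summary_py stalled) :
    blocker_summary_py stalled = blocker_summary_py_alt stalled := by
  have hpre' : ∀ d ∈ stalled, ((PySem.Dict.mk d).get? "blocker").isSome := by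
    intro d hd
    have hc := (List.all_eq_true.mp h) d hd
    simp only [PySem.Dict.contains, List.any_eq_true] at hc
    simp only [PySem.Dict.get?, Option.isSome_map, List.find?_isSome]
    exact hc
  simp only [blocker_summary_py, blocker_summary_py_alt]
  rw [foldl_match_eq _ stalled PySem.Dict.empty hpre',
    foldl_match_eq _ stalled PySem.Dict.empty hpre']
  have hA : (stalled.map rawKey).foldl
      (fun (c : PySem.Dict String Int) (b : String) =>
        c.insert (labelOf b) (c.getD (labelOf b) 0 + 1)) PySem.Dict.empty
      = PySem.Dict.counter ((stalled.map rawKey).map labelOf) := by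
    rw [← PySem.Dict.foldl_insert_getD_add_one_eq_counter, List.foldl_map]
    conv_rhs => rw [List.foldl_map, List.foldl_map]
  have hB : (stalled.map rawKey).foldl
      (fun (c : PySem.Dict String Int) (b : String) =>
        c.insert b (c.getD b 0 + 1)) PySem.Dict.empty
      = PySem.Dict.counter (stalled.map rawKey) :=
    PySem.Dict.foldl_insert_getD_add_one_eq_counter _
  rw [show (stalled.map rawKey).foldl
      (fun (c : PySem.Dict String Int) (b : String) =>
        (PySem.Dict.ofList [("executive_change", "Missing executive sponsor"),
          ("legal_review", "Legal / contract review"),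
          ("competitor_eval", "Competitor evaluation ongoing"),
          ("budget_hold", "Budget approval pending"),
          ("no_champion", "No internal champion")]).getD b b |>
          (fun label => c.insert label (c.getD label 0 + 1))) PySem.Dict.empty
      = PySem.Dict.counter ((stalled.map rawKey).map labelOf) from hA,
    hB,
    show (List.foldl (fun (result : PySem.Dict String Int) (p : String × Int) =>
        result.insert (blockerLabels.getD p.1 p.1) (result.getD (blockerLabels.getD p.1 p.1) 0 + p.2))
        PySem.Dict.empty (PySem.Dict.counter (stalled.map rawKey)).items)
      = PySem.Dict.counter ((stalled.map rawKey).map labelOf)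
      from merge_counter_eq labelOf (stalled.map rawKey)]
-- ===== VERDICT (by name: the statement is the Claim_ definition above) =====
theorem blocker_summary_py_spec : Claim_equal_blocker_summary_py := by
  intro stalled _ hpre
  exact ports_agree stalled hpre
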